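-- pv_equiv track=rewrite | github.com/esgn/ansible-osm-tileserver | utils/meta2tile.py | meta_to_xyz
-- ===== SOURCE A (Python) =====
-- def meta_to_xyz(pattern_meta_with_zoom='6/0/0/0/50/136'):
--     """
--     Convert meta tiles to z x y scheme for mod_tile
--     Author: Thomas Gratier based on Frederik Ramm C code from meta2tile.c from mod_tile
--     License: GPL
--     """
--     x, y = 0, 0
--     path_elements = [int(i) for i in pattern_meta_with_zoom.split('/')]
--     z = path_elements.pop(0)
--     for i in path_elements:
--         x <<= 4
--         y <<= 4
--         x |= (i & 0xf0) >> 4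
--         y |= (i & 0x0f)
--     return z, x, y
-- ===== SOURCE B (Python) =====
-- def meta_to_xyz(pattern_meta_with_zoom='6/0/0/0/50/136'):
--     """
--     Convert meta tiles to z x y scheme for mod_tile.
--
--     Positional closed form: read back to front, the k-th element from the
--     end contributes its high nibble to x and its low nibble to y with
--     positional weight 16**k.
--     """
--     parts = pattern_meta_with_zoom.split('/')
--     z = int(parts[0])
--     rest = [int(p) for p in parts[1:]]
--     x = sum(((b & 0xf0) >> 4) * 16 ** k for k, b in enumerate(reversed(rest)))
--     y = sum((b & 0x0f) * 16 ** k for k, b in enumerate(reversed(rest)))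
--     return z, x, y
-- ===== Notes on version B (the rewrite author's own statement) =====
-- stated objective: alternative
-- what changed: Replaces A's stateful shift-and-or accumulation over the path elements by a closed-form positional sum: reading the elements back to front, the k-th element from the end contributes its high nibble to x and its low nibble to y with weight 16**k.
import Mathlib
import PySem

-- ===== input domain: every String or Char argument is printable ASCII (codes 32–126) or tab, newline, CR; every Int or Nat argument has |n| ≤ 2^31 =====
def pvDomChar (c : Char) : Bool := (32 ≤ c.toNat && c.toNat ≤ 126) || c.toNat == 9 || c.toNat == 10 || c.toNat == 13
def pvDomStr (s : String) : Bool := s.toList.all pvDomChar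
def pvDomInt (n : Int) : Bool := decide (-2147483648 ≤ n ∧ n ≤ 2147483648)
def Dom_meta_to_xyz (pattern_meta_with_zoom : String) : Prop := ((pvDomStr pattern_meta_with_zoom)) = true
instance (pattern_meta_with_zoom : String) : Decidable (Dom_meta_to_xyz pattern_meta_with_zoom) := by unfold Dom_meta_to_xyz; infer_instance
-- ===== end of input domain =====

-- B replaces A's stateful shift-and-or accumulation by a closed-form positional sum
-- over the reversed element list (alternative decomposition, same cost).

-- ===== PORT A =====
-- Python A: split on '/', int() every piece, pop z, then fold x<<=4; y<<=4; x|=(i&0xf0)>>4; y|=i&0x0f.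
-- int(t) is PySem.Int.ofChars?; Pre_ guarantees it succeeds, so `.getD 0` is never taken inside Pre_.
def meta_to_xyz (pattern_meta_with_zoom : String) : Int × Int × Int :=
  let path_elements :=
    (PySem.Chars.splitOn pattern_meta_with_zoom.toList ['/']).map
      (fun t => (PySem.Int.ofChars? t).getD 0)
  match path_elements with
  | [] => (0, 0, 0)      -- unreachable: Python's split never returns an empty list
  | z :: rest =>
    let xy := rest.foldl
      (fun (xy : Int × Int) i =>
        let x := xy.1 <<< (4 : Nat)
        let y := xy.2 <<< (4 : Nat)
        (PySem.Int.bor x (PySem.Int.band i 0xf0 >>> (4 : Nat)),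
         PySem.Int.bor y (PySem.Int.band i 0x0f)))
      (0, 0)
    (z, xy.1, xy.2)

-- ===== PORT B =====
-- Python B: z = int(parts[0]); rest = [int(p) for p in parts[1:]]; x and y are positional
-- sums over enumerate(reversed(rest)).  parts[1:] on a list is exactly List.drop 1;
-- Python's 16 ** k has k ≥ 0 (an enumerate index), so `16 ^ k.toNat` is exact.
def meta_to_xyz_alt (pattern_meta_with_zoom : String) : Int × Int × Int :=
  let parts := PySem.Chars.splitOn pattern_meta_with_zoom.toList ['/']
  let z := (PySem.Int.ofChars? (PySem.List.pyGetD parts 0 [])).getD 0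
  let rest := (parts.drop 1).map (fun p => (PySem.Int.ofChars? p).getD 0)
  let x := ((PySem.List.enumerate rest.reverse).map
      (fun kb => (PySem.Int.band kb.2 0xf0 >>> (4 : Nat)) * 16 ^ kb.1.toNat)).sum
  let y := ((PySem.List.enumerate rest.reverse).map
      (fun kb => (PySem.Int.band kb.2 0x0f) * 16 ^ kb.1.toNat)).sum
  (z, x, y)

-- ===== PRECONDITION & SPEC =====
-- Pre_: every slash-separated piece parses as a Python int — exactly where A's int(i) does not raise ValueError.
def Pre_meta_to_xyz (pattern_meta_with_zoom : String) : Prop :=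
  ∀ t ∈ PySem.Chars.splitOn pattern_meta_with_zoom.toList ['/'], (PySem.Int.ofChars? t).isSome
instance (pattern_meta_with_zoom : String) : Decidable (Pre_meta_to_xyz pattern_meta_with_zoom) := by
  unfold Pre_meta_to_xyz; infer_instance
def pvWitness_meta_to_xyz : String := "6/0/0/0/50/136"

def Spec_meta_to_xyz (pattern_meta_with_zoom : String) (out : Int × Int × Int) : Prop := out = meta_to_xyz_alt pattern_meta_with_zoom
instance (pattern_meta_with_zoom : String) (out : Int × Int × Int) : Decidable (Spec_meta_to_xyz pattern_meta_with_zoom out) := by unfold Spec_meta_to_xyz; infer_instance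

-- ===== CLAIM (what is proved, stated in full; the proofs are below) =====
def Claim_equal_meta_to_xyz : Prop := ∀ (pattern_meta_with_zoom : String), Dom_meta_to_xyz pattern_meta_with_zoom → Pre_meta_to_xyz pattern_meta_with_zoom → Spec_meta_to_xyz pattern_meta_with_zoom (meta_to_xyz pattern_meta_with_zoom)

-- ===== LEMMAS AND PROOFS =====

-- disjoint-bit OR is addition: a 4-bit value OR'd below a shifted value just adds
theorem pv_or16 (m k : Nat) (h : k < 16) : m * 16 ||| k = m * 16 + k := by
  apply Nat.eq_of_testBit_eq
  intro j
  rw [Nat.testBit_lor]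
  have hm16 : m * 16 = m <<< 4 := by simp [Nat.shiftLeft_eq]
  rcases Nat.lt_or_ge j 4 with hj | hj
  · have h1 : (m * 16).testBit j = false := by
      rw [hm16, Nat.testBit_shiftLeft]; simp; omega
    have h2 : (m * 16 + k).testBit j = k.testBit j := by
      have hmt := Nat.testBit_mod_two_pow (m * 16 + k) 4 j
      have e : (m * 16 + k) % 2 ^ 4 = k := by omega
      rw [e] at hmt
      rw [hmt]; simp [hj]
    rw [h1, h2]; simp
  · have h1 : k.testBit j = false := by
      apply Nat.testBit_eq_false_of_lt
      calc k < 16 := h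
        _ = 2 ^ 4 := by norm_num
        _ ≤ 2 ^ j := Nat.pow_le_pow_right (by norm_num) hj
    have h2 : (m * 16).testBit j = m.testBit (j - 4) := by
      rw [hm16, Nat.testBit_shiftLeft]; simp [hj]
    have h3 : (m * 16 + k).testBit j = m.testBit (j - 4) := by
      have e : (m * 16 + k) >>> 4 = m := by rw [Nat.shiftRight_eq_div_pow]; omega
      have hsr := Nat.testBit_shiftRight (x := m * 16 + k) (i := 4) (j := j - 4)
      rw [e] at hsr
      rw [hsr]; congr 1; omega
    rw [h1, h2, h3]; simp

theorem pv_band15_bounds (i : Int) : 0 ≤ PySem.Int.band i 15 ∧ PySem.Int.band i 15 < 16 := by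
  unfold PySem.Int.band
  split_ifs with h1 h2 h2
  · have := Nat.and_le_right (n := i.toNat) (m := (15 : Int).toNat)
    constructor
    · positivity
    · norm_num at this ⊢; omega
  · omega
  · have : ((15 : Int).toNat - ((15 : Int).toNat &&& (-i - 1).toNat)) ≤ 15 := by omega
    constructor
    · positivity
    · omega
  · omega

theorem pv_band240_bounds (i : Int) : 0 ≤ PySem.Int.band i 240 ∧ PySem.Int.band i 240 ≤ 240 := by
  unfold PySem.Int.band
  split_ifs with h1 h2 h2
  · have := Nat.and_le_right (n := i.toNat) (m := (240 : Int).toNat)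
    constructor
    · positivity
    · norm_num at this ⊢; omega
  · omega
  · have : ((240 : Int).toNat - ((240 : Int).toNat &&& (-i - 1).toNat)) ≤ 240 := by omega
    constructor
    · positivity
    · omega
  · omega

theorem pv_hi_bounds (i : Int) :
    0 ≤ PySem.Int.band i 240 >>> (4 : Nat) ∧ PySem.Int.band i 240 >>> (4 : Nat) < 16 := by
  obtain ⟨h0, h1⟩ := pv_band240_bounds i
  rw [Int.shiftRight_eq_div_pow]
  norm_num
  omega

-- the shift-and-or step is multiply-by-16-and-add, for a nonnegative accumulator and a nibble
theorem pv_bor_shift (x n : Int) (hx : 0 ≤ x) (hn0 : 0 ≤ n) (hn : n < 16) :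
    PySem.Int.bor (x <<< (4 : Nat)) n = 16 * x + n := by
  obtain ⟨m, rfl⟩ := Int.eq_ofNat_of_zero_le hx
  obtain ⟨k, rfl⟩ := Int.eq_ofNat_of_zero_le hn0
  have hk : k < 16 := by exact_mod_cast hn
  rw [Int.shiftLeft_eq]
  unfold PySem.Int.bor
  have hnn : (0 : Int) ≤ (m : Int) * 2 ^ 4 := by positivity
  rw [if_pos hnn, if_pos (by exact_mod_cast Nat.zero_le k)]
  have e1 : ((m : Int) * 2 ^ 4).toNat = m * 16 := by
    norm_num; omega
  have e2 : ((k : Int)).toNat = k := Int.toNat_natCast k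
  rw [e1, e2, pv_or16 m k hk]
  push_cast
  ring

-- enumerate of an appended singleton
theorem pv_enumerate_append_singleton {α : Type} (xs : List α) (a : α) (s : Int) :
    PySem.List.enumerate (xs ++ [a]) s
      = PySem.List.enumerate xs s ++ [(s + xs.length, a)] := by
  induction xs generalizing s with
  | nil => simp [PySem.List.enumerate]
  | cons x t ih =>
      simp [PySem.List.enumerate, ih]
      ring_nf

-- the two positional sums of B, as functions of the element list
def pvShi (l : List Int) : Int :=
  ((PySem.List.enumerate l.reverse).map
      (fun kb => (PySem.Int.band kb.2 0xf0 >>> (4 : Nat)) * 16 ^ kb.1.toNat)).sum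
def pvSlo (l : List Int) : Int :=
  ((PySem.List.enumerate l.reverse).map
      (fun kb => (PySem.Int.band kb.2 0x0f) * 16 ^ kb.1.toNat)).sum

theorem pv_Shi_cons (a : Int) (t : List Int) :
    pvShi (a :: t) = pvShi t + (PySem.Int.band a 240 >>> (4 : Nat)) * 16 ^ t.length := by
  unfold pvShi
  rw [List.reverse_cons, pv_enumerate_append_singleton]
  simp

theorem pv_Slo_cons (a : Int) (t : List Int) :
    pvSlo (a :: t) = pvSlo t + (PySem.Int.band a 15) * 16 ^ t.length := by
  unfold pvSlo
  rw [List.reverse_cons, pv_enumerate_append_singleton]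
  simp

-- loop invariant: A's fold from (x, y) is (x·16^n + Shi, y·16^n + Slo)
theorem pv_fold_eq (l : List Int) (x y : Int) (hx : 0 ≤ x) (hy : 0 ≤ y) :
    l.foldl
      (fun (xy : Int × Int) i =>
        (PySem.Int.bor (xy.1 <<< (4 : Nat)) (PySem.Int.band i 0xf0 >>> (4 : Nat)),
         PySem.Int.bor (xy.2 <<< (4 : Nat)) (PySem.Int.band i 0x0f)))
      (x, y)
    = (x * 16 ^ l.length + pvShi l, y * 16 ^ l.length + pvSlo l) := by
  induction l generalizing x y with
  | nil => simp [pvShi, pvSlo]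
  | cons a t ih =>
      obtain ⟨hh0, hh1⟩ := pv_hi_bounds a
      obtain ⟨hl0, hl1⟩ := pv_band15_bounds a
      rw [List.foldl_cons]
      have estep :
          (PySem.Int.bor (x <<< (4 : Nat)) (PySem.Int.band a 0xf0 >>> (4 : Nat)),
           PySem.Int.bor (y <<< (4 : Nat)) (PySem.Int.band a 0x0f))
          = ((16 * x + PySem.Int.band a 240 >>> (4 : Nat) : Int),
             (16 * y + PySem.Int.band a 15 : Int)) := by
        rw [pv_bor_shift x _ hx hh0 hh1, pv_bor_shift y _ hy hl0 hl1]
      rw [estep, ih _ _ (by omega) (by omega), pv_Shi_cons, pv_Slo_cons]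
      simp [List.length_cons, pow_succ]
      constructor <;> ring

-- ===== VERDICT (by name: the statement is the Claim_ definition above) =====
theorem meta_to_xyz_spec : Claim_equal_meta_to_xyz := by
  intro s _hDom _hPre
  unfold Spec_meta_to_xyz meta_to_xyz meta_to_xyz_alt
  cases hp : PySem.Chars.splitOn s.toList ['/'] with
  | nil =>
      simp only [List.map_nil, List.drop_nil, List.reverse_nil]
      decide
  | cons p ps =>
      simp only [List.map_cons, List.drop_succ_cons, List.drop_zero]
      rw [pv_fold_eq (ps.map (fun t => (PySem.Int.ofChars? t).getD 0)) 0 0 le_rfl le_rfl]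
      simp [pvShi, pvSlo, PySem.List.pyGetD_zero_cons]
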